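-- pv_equiv track=rewrite | github.com/m3trik/uitk | uitk/widgets/messageBox.py | _setHTML
-- ===== SOURCE A (Python) =====
-- def _setHTML(string) -> str:
--     """<p style="font-size:160%;">text</p>
--     <p style="text-align:center;">Centered paragraph.</p>
--     <p style="font-family:courier;">This is a paragraph.</p>
--
--     Returns:
--         (str)
--     """
--     style = {
--         "<p>": '<p style="color:white;">',  # paragraph <p>' </p>'
--         "<hl>": '<hl style="color:yellow; font-weight: bold;">',  # heading <h1>' </h1>'
--         "<body>": '<body style="color;">',  # body <body> </body>
--         "<b>": '<b style="font-weight: bold;">',  # bold <b> </b>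
--         "<strong>": '<strong style="font-weight: bold;">',  # <strong> </strong>
--         "<mark>": '<mark style="background-color: grey">',  # highlight <mark> </mark>
--     }
--
--     for k, v in style.items():
--         string = string.replace(k, v)
--
--     return string
-- ===== SOURCE B (Python) =====
-- def _setHTML(string) -> str:
--     """Single left-to-right scan: at each position try the tag table in order,
--     emit the styled replacement on a match (and jump past the tag), else copy
--     the character. One pass instead of six full-string .replace passes."""
--     style = {
--         "<p>": '<p style="color:white;">',
--         "<hl>": '<hl style="color:yellow; font-weight: bold;">',
--         "<body>": '<body style="color;">',
--         "<b>": '<b style="font-weight: bold;">',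
--         "<strong>": '<strong style="font-weight: bold;">',
--         "<mark>": '<mark style="background-color: grey">',
--     }
--     out = []
--     i = 0
--     n = len(string)
--     while i < n:
--         for k, v in style.items():
--             if string.startswith(k, i):
--                 out.append(v)
--                 i += len(k)
--                 break
--         else:
--             out.append(string[i])
--             i += 1
--     return "".join(out)
-- ===== Notes on version B (the rewrite author's own statement) =====
-- stated objective: alternative
-- what changed: Replaced six sequential full-string .replace passes with a single left-to-right scan that tries the tag table at each position (emit replacement and jump past the tag, else copy the character), building the output once.
import Mathlib
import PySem

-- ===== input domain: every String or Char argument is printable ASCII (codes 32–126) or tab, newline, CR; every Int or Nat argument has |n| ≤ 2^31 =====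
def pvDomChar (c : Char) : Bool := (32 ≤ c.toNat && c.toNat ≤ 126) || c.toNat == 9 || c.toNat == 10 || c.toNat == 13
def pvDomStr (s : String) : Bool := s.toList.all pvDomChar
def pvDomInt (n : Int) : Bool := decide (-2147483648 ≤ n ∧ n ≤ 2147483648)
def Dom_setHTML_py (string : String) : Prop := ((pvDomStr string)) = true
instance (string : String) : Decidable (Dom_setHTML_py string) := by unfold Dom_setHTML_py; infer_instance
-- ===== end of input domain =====

set_option maxRecDepth 8192


-- B replaces A's six sequential full-string .replace passes by one left-to-right scan over
-- the string that tries the tag table at each position; objective: alternative single-pass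
-- formulation (same exact output, no speed claim).

-- ===== PORT A =====
def setHTML_py (string : String) : String :=
  -- literal port: for k, v in style.items(): string = string.replace(k, v)
  let s1 := PySem.Str.replace string "<p>" "<p style=\"color:white;\">"
  let s2 := PySem.Str.replace s1 "<hl>" "<hl style=\"color:yellow; font-weight: bold;\">"
  let s3 := PySem.Str.replace s2 "<body>" "<body style=\"color;\">"
  let s4 := PySem.Str.replace s3 "<b>" "<b style=\"font-weight: bold;\">"
  let s5 := PySem.Str.replace s4 "<strong>" "<strong style=\"font-weight: bold;\">"
  let s6 := PySem.Str.replace s5 "<mark>" "<mark style=\"background-color: grey\">"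
  s6

-- ===== PORT B =====
-- the tag table, in Source B's iteration order
def pvK1 : List Char := "<p>".toList
def pvV1 : List Char := "<p style=\"color:white;\">".toList
def pvK2 : List Char := "<hl>".toList
def pvV2 : List Char := "<hl style=\"color:yellow; font-weight: bold;\">".toList
def pvK3 : List Char := "<body>".toList
def pvV3 : List Char := "<body style=\"color;\">".toList
def pvK4 : List Char := "<b>".toList
def pvV4 : List Char := "<b style=\"font-weight: bold;\">".toList
def pvK5 : List Char := "<strong>".toList
def pvV5 : List Char := "<strong style=\"font-weight: bold;\">".toList
def pvK6 : List Char := "<mark>".toList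
def pvV6 : List Char := "<mark style=\"background-color: grey\">".toList

-- Source B's while-loop: at each position try the table keys in order; on a match emit the
-- replacement and jump past the key (drop its length), else copy one character.
def pvScan : List Char → List Char
  | [] => []
  | c :: t =>
    if pvK1.isPrefixOf (c :: t) then pvV1 ++ pvScan (t.drop 2)        -- len "<p>" = 3
    else if pvK2.isPrefixOf (c :: t) then pvV2 ++ pvScan (t.drop 3)   -- len "<hl>" = 4
    else if pvK3.isPrefixOf (c :: t) then pvV3 ++ pvScan (t.drop 5)   -- len "<body>" = 6
    else if pvK4.isPrefixOf (c :: t) then pvV4 ++ pvScan (t.drop 2)   -- len "<b>" = 3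
    else if pvK5.isPrefixOf (c :: t) then pvV5 ++ pvScan (t.drop 7)   -- len "<strong>" = 8
    else if pvK6.isPrefixOf (c :: t) then pvV6 ++ pvScan (t.drop 5)   -- len "<mark>" = 6
    else c :: pvScan t
  termination_by cs => cs.length
  decreasing_by all_goals (simp [List.length_drop]; try omega)

def setHTML_py_alt (string : String) : String :=
  String.ofList (pvScan string.toList)

-- ===== PRECONDITION & SPEC =====
def Spec_setHTML_py (string : String) (out : String) : Prop := out = setHTML_py_alt string
instance (string : String) (out : String) : Decidable (Spec_setHTML_py string out) := by unfold Spec_setHTML_py; infer_instance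

-- ===== CLAIM (what is proved, stated in full; the proofs are below) =====
def Claim_equal_setHTML_py : Prop := ∀ (string : String), Dom_setHTML_py string → Spec_setHTML_py string (setHTML_py string)

-- ===== LEMMAS AND PROOFS =====

-- A's chain of six replaces, on char lists
def pvChainA (l : List Char) : List Char :=
  PySem.Chars.replace (PySem.Chars.replace (PySem.Chars.replace (PySem.Chars.replace
    (PySem.Chars.replace (PySem.Chars.replace l pvK1 pvV1) pvK2 pvV2) pvK3 pvV3)
      pvK4 pvV4) pvK5 pvV5) pvK6 pvV6

-- replace.go with enough fuel computes replace of the rest, prefixed by the accumulator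
theorem pv_go_acc (old new : List Char) (hold : old ≠ []) :
    ∀ fuel l acc, l.length ≤ fuel →
      PySem.Chars.replace.go old new fuel l acc
        = acc.reverse ++ PySem.Chars.replace l old new := by
  intro fuel
  induction fuel using Nat.strong_induction_on with
  | _ fuel ih =>
    intro l acc hle
    match fuel, l with
    | 0, l =>
      have : l = [] := List.eq_nil_of_length_eq_zero (Nat.le_zero.mp hle)
      subst this
      simp [PySem.Chars.replace.go, PySem.Chars.replace, List.isEmpty_iff, hold]
    | fuel+1, [] =>
      simp [PySem.Chars.replace.go, PySem.Chars.replace, List.isEmpty_iff, hold]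
    | fuel+1, c :: t =>
      have hlen : t.length ≤ fuel := by simpa using hle
      have hone : 1 ≤ old.length := List.length_pos_iff.mpr hold
      have hrep : PySem.Chars.replace (c :: t) old new
          = PySem.Chars.replace.go old new (t.length + 1) (c :: t) [] := by
        rw [PySem.Chars.replace, if_neg (by simp [List.isEmpty_iff, hold])]
        simp
      rw [PySem.Chars.replace.go, hrep]
      conv_rhs => rw [PySem.Chars.replace.go]
      split_ifs with h
      · rw [ih fuel (Nat.lt_succ_self _) _ _ (by simp; omega),
            ih t.length (Nat.lt_succ_of_le hlen) _ _ (by simp; omega)]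
        simp
      · rw [ih fuel (Nat.lt_succ_self _) _ _ hlen,
            ih t.length (Nat.lt_succ_of_le hlen) _ _ le_rfl]
        simp

theorem pv_replace_nil (old new : List Char) (hold : old ≠ []) :
    PySem.Chars.replace [] old new = [] := by
  simp [PySem.Chars.replace, List.isEmpty_iff, hold, PySem.Chars.replace.go]

theorem pv_replace_match (old new l : List Char) (hold : old ≠ []) (hp : old <+: l) :
    PySem.Chars.replace l old new = new ++ PySem.Chars.replace (l.drop old.length) old new := by
  have hone : 1 ≤ old.length := List.length_pos_iff.mpr hold
  cases l with
  | nil => exact absurd (List.prefix_nil.mp hp) hold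
  | cons c t =>
    rw [PySem.Chars.replace, if_neg (by simp [List.isEmpty_iff, hold])]
    simp only [List.length_cons]
    rw [PySem.Chars.replace.go, if_pos (List.isPrefixOf_iff_prefix.mpr hp)]
    rw [pv_go_acc old new hold t.length _ _ (by simp; omega)]
    simp

theorem pv_replace_cons_no (old new : List Char) (c : Char) (t : List Char)
    (hold : old ≠ []) (hp : ¬ old <+: c :: t) :
    PySem.Chars.replace (c :: t) old new = c :: PySem.Chars.replace t old new := by
  rw [PySem.Chars.replace, if_neg (by simp [List.isEmpty_iff, hold])]
  simp only [List.length_cons]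
  rw [PySem.Chars.replace.go,
      if_neg (by rw [List.isPrefixOf_iff_prefix]; exact hp)]
  rw [pv_go_acc old new hold t.length _ _ le_rfl]
  simp


-- "k never matches starting strictly inside v, nor spanning out of v"
def pvNoOv (k v : List Char) : Prop :=
  ∀ j, j < v.length → ¬ k <+: v.drop j ∧ ¬ v.drop j <+: k

theorem pv_prefix_append_cases {k v X : List Char} (h : k <+: v ++ X) :
    k <+: v ∨ v <+: k := by
  rcases Nat.le_total k.length v.length with hl | hl
  · exact Or.inl (List.prefix_of_prefix_length_le h (List.prefix_append v X) hl)
  · exact Or.inr (List.prefix_of_prefix_length_le (List.prefix_append v X) h hl)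

-- a block v that k cannot match into passes through replace unchanged
theorem pv_pass (k w v : List Char) (hk : k ≠ []) (hno : pvNoOv k v) :
    ∀ X, PySem.Chars.replace (v ++ X) k w = v ++ PySem.Chars.replace X k w := by
  induction v with
  | nil => intro X; simp
  | cons c v' ih =>
    intro X
    have h0 := hno 0 (by simp)
    simp only [List.drop_zero] at h0
    have hnp : ¬ k <+: (c :: v') ++ X := fun h =>
      (pv_prefix_append_cases h).elim h0.1 h0.2
    rw [List.cons_append,
        pv_replace_cons_no k w c (v' ++ X) hk (by simpa using hnp),
        ih (fun j hj => by simpa using hno (j + 1) (by simpa using Nat.succ_lt_succ hj))]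
    simp

-- a '<'-free pattern found in replace's output was already in the input
theorem pv_transfer (k1 v1 : List Char) (hk : k1 ≠ []) (w1 : List Char) (hv : v1 = '<' :: w1) :
    ∀ t p, (∀ ch ∈ p, ch ≠ '<') → p <+: PySem.Chars.replace t k1 v1 → p <+: t := by
  intro t
  induction t with
  | nil =>
    intro p hp hpre
    rw [pv_replace_nil _ _ hk] at hpre
    rw [List.prefix_nil.mp hpre]
  | cons c t' ih =>
    intro p hp hpre
    by_cases h : k1 <+: c :: t'
    · rw [pv_replace_match k1 v1 _ hk h, hv] at hpre
      cases p with
      | nil => exact List.nil_prefix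
      | cons p0 p' =>
        rw [List.cons_append, List.cons_prefix_cons] at hpre
        exact absurd hpre.1 (hp p0 (by simp))
    · rw [pv_replace_cons_no k1 v1 c t' hk h] at hpre
      cases p with
      | nil => exact List.nil_prefix
      | cons p0 p' =>
        rw [List.cons_prefix_cons] at hpre ⊢
        exact ⟨hpre.1, ih p' (fun ch hc => hp ch (by simp [hc])) hpre.2⟩

-- hence replace cannot create a new match of another tag at the front
theorem pv_noPrefix_lift (k1 v1 : List Char) (hk1 : k1 ≠ []) (w1 : List Char)
    (hv : v1 = '<' :: w1) (k kt : List Char) (hkk : k = '<' :: kt)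
    (hkt : ∀ ch ∈ kt, ch ≠ '<') (c : Char) (t : List Char)
    (h : ¬ k <+: c :: t) : ¬ k <+: c :: PySem.Chars.replace t k1 v1 := by
  intro hcontra
  rw [hkk, List.cons_prefix_cons] at hcontra
  exact h (by
    rw [hkk, List.cons_prefix_cons]
    exact ⟨hcontra.1, pv_transfer k1 v1 hk1 w1 hv t kt hkt hcontra.2⟩)

theorem pv_noLt (l : List Char) (h : (l.all (fun ch => ch != '<')) = true) :
    ∀ ch ∈ l, ch ≠ '<' := by
  simpa [List.all_eq_true] using h

theorem pv_chain_nil : pvChainA [] = pvScan [] := by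
  unfold pvChainA
  rw [pv_replace_nil pvK1 pvV1 (by decide), pv_replace_nil pvK2 pvV2 (by decide),
      pv_replace_nil pvK3 pvV3 (by decide), pv_replace_nil pvK4 pvV4 (by decide),
      pv_replace_nil pvK5 pvV5 (by decide), pv_replace_nil pvK6 pvV6 (by decide), pvScan]

theorem pv_main : ∀ n (cs : List Char), cs.length ≤ n → pvChainA cs = pvScan cs := by
  intro n
  induction n with
  | zero =>
    intro cs hle
    rw [List.eq_nil_of_length_eq_zero (Nat.le_zero.mp hle)]
    exact pv_chain_nil
  | succ n ih =>
    intro cs hle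
    match cs with
    | [] => exact pv_chain_nil
    | c :: t =>
      have ht : t.length ≤ n := by simpa using hle
      by_cases h1 : pvK1 <+: c :: t
      · have hsplit : pvK1 ++ t.drop 2 = c :: t := by
          have h := List.prefix_iff_eq_append.mp h1
          rwa [(by decide : (pvK1).length = 3), List.drop_succ_cons] at h
        have hlen' : (t.drop 2).length ≤ n := by simp; omega
        unfold pvChainA
        rw [pvScan]
        rw [if_pos (by simpa [List.isPrefixOf_iff_prefix] using h1)]
        rw [← hsplit]
        rw [pv_replace_match pvK1 pvV1 _ (by decide) (List.prefix_append _ _), List.drop_left]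
        rw [pv_pass pvK2 pvV2 pvV1 (by decide) (by unfold pvNoOv; decide)]
        rw [pv_pass pvK3 pvV3 pvV1 (by decide) (by unfold pvNoOv; decide)]
        rw [pv_pass pvK4 pvV4 pvV1 (by decide) (by unfold pvNoOv; decide)]
        rw [pv_pass pvK5 pvV5 pvV1 (by decide) (by unfold pvNoOv; decide)]
        rw [pv_pass pvK6 pvV6 pvV1 (by decide) (by unfold pvNoOv; decide)]
        change pvV1 ++ pvChainA (t.drop 2) = pvV1 ++ pvScan (t.drop 2)
        rw [ih _ hlen']
      by_cases h2 : pvK2 <+: c :: t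
      · have hsplit : pvK2 ++ t.drop 3 = c :: t := by
          have h := List.prefix_iff_eq_append.mp h2
          rwa [(by decide : (pvK2).length = 4), List.drop_succ_cons] at h
        have hlen' : (t.drop 3).length ≤ n := by simp; omega
        unfold pvChainA
        rw [pvScan]
        rw [if_neg (by simpa [List.isPrefixOf_iff_prefix] using h1)]
        rw [if_pos (by simpa [List.isPrefixOf_iff_prefix] using h2)]
        rw [← hsplit]
        rw [pv_pass pvK1 pvV1 pvK2 (by decide) (by unfold pvNoOv; decide)]
        rw [pv_replace_match pvK2 pvV2 _ (by decide) (List.prefix_append _ _), List.drop_left]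
        rw [pv_pass pvK3 pvV3 pvV2 (by decide) (by unfold pvNoOv; decide)]
        rw [pv_pass pvK4 pvV4 pvV2 (by decide) (by unfold pvNoOv; decide)]
        rw [pv_pass pvK5 pvV5 pvV2 (by decide) (by unfold pvNoOv; decide)]
        rw [pv_pass pvK6 pvV6 pvV2 (by decide) (by unfold pvNoOv; decide)]
        change pvV2 ++ pvChainA (t.drop 3) = pvV2 ++ pvScan (t.drop 3)
        rw [ih _ hlen']
      by_cases h3 : pvK3 <+: c :: t
      · have hsplit : pvK3 ++ t.drop 5 = c :: t := by
          have h := List.prefix_iff_eq_append.mp h3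
          rwa [(by decide : (pvK3).length = 6), List.drop_succ_cons] at h
        have hlen' : (t.drop 5).length ≤ n := by simp; omega
        unfold pvChainA
        rw [pvScan]
        rw [if_neg (by simpa [List.isPrefixOf_iff_prefix] using h1)]
        rw [if_neg (by simpa [List.isPrefixOf_iff_prefix] using h2)]
        rw [if_pos (by simpa [List.isPrefixOf_iff_prefix] using h3)]
        rw [← hsplit]
        rw [pv_pass pvK1 pvV1 pvK3 (by decide) (by unfold pvNoOv; decide)]
        rw [pv_pass pvK2 pvV2 pvK3 (by decide) (by unfold pvNoOv; decide)]
        rw [pv_replace_match pvK3 pvV3 _ (by decide) (List.prefix_append _ _), List.drop_left]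
        rw [pv_pass pvK4 pvV4 pvV3 (by decide) (by unfold pvNoOv; decide)]
        rw [pv_pass pvK5 pvV5 pvV3 (by decide) (by unfold pvNoOv; decide)]
        rw [pv_pass pvK6 pvV6 pvV3 (by decide) (by unfold pvNoOv; decide)]
        change pvV3 ++ pvChainA (t.drop 5) = pvV3 ++ pvScan (t.drop 5)
        rw [ih _ hlen']
      by_cases h4 : pvK4 <+: c :: t
      · have hsplit : pvK4 ++ t.drop 2 = c :: t := by
          have h := List.prefix_iff_eq_append.mp h4
          rwa [(by decide : (pvK4).length = 3), List.drop_succ_cons] at h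
        have hlen' : (t.drop 2).length ≤ n := by simp; omega
        unfold pvChainA
        rw [pvScan]
        rw [if_neg (by simpa [List.isPrefixOf_iff_prefix] using h1)]
        rw [if_neg (by simpa [List.isPrefixOf_iff_prefix] using h2)]
        rw [if_neg (by simpa [List.isPrefixOf_iff_prefix] using h3)]
        rw [if_pos (by simpa [List.isPrefixOf_iff_prefix] using h4)]
        rw [← hsplit]
        rw [pv_pass pvK1 pvV1 pvK4 (by decide) (by unfold pvNoOv; decide)]
        rw [pv_pass pvK2 pvV2 pvK4 (by decide) (by unfold pvNoOv; decide)]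
        rw [pv_pass pvK3 pvV3 pvK4 (by decide) (by unfold pvNoOv; decide)]
        rw [pv_replace_match pvK4 pvV4 _ (by decide) (List.prefix_append _ _), List.drop_left]
        rw [pv_pass pvK5 pvV5 pvV4 (by decide) (by unfold pvNoOv; decide)]
        rw [pv_pass pvK6 pvV6 pvV4 (by decide) (by unfold pvNoOv; decide)]
        change pvV4 ++ pvChainA (t.drop 2) = pvV4 ++ pvScan (t.drop 2)
        rw [ih _ hlen']
      by_cases h5 : pvK5 <+: c :: t
      · have hsplit : pvK5 ++ t.drop 7 = c :: t := by
          have h := List.prefix_iff_eq_append.mp h5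
          rwa [(by decide : (pvK5).length = 8), List.drop_succ_cons] at h
        have hlen' : (t.drop 7).length ≤ n := by simp; omega
        unfold pvChainA
        rw [pvScan]
        rw [if_neg (by simpa [List.isPrefixOf_iff_prefix] using h1)]
        rw [if_neg (by simpa [List.isPrefixOf_iff_prefix] using h2)]
        rw [if_neg (by simpa [List.isPrefixOf_iff_prefix] using h3)]
        rw [if_neg (by simpa [List.isPrefixOf_iff_prefix] using h4)]
        rw [if_pos (by simpa [List.isPrefixOf_iff_prefix] using h5)]
        rw [← hsplit]
        rw [pv_pass pvK1 pvV1 pvK5 (by decide) (by unfold pvNoOv; decide)]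
        rw [pv_pass pvK2 pvV2 pvK5 (by decide) (by unfold pvNoOv; decide)]
        rw [pv_pass pvK3 pvV3 pvK5 (by decide) (by unfold pvNoOv; decide)]
        rw [pv_pass pvK4 pvV4 pvK5 (by decide) (by unfold pvNoOv; decide)]
        rw [pv_replace_match pvK5 pvV5 _ (by decide) (List.prefix_append _ _), List.drop_left]
        rw [pv_pass pvK6 pvV6 pvV5 (by decide) (by unfold pvNoOv; decide)]
        change pvV5 ++ pvChainA (t.drop 7) = pvV5 ++ pvScan (t.drop 7)
        rw [ih _ hlen']
      by_cases h6 : pvK6 <+: c :: t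
      · have hsplit : pvK6 ++ t.drop 5 = c :: t := by
          have h := List.prefix_iff_eq_append.mp h6
          rwa [(by decide : (pvK6).length = 6), List.drop_succ_cons] at h
        have hlen' : (t.drop 5).length ≤ n := by simp; omega
        unfold pvChainA
        rw [pvScan]
        rw [if_neg (by simpa [List.isPrefixOf_iff_prefix] using h1)]
        rw [if_neg (by simpa [List.isPrefixOf_iff_prefix] using h2)]
        rw [if_neg (by simpa [List.isPrefixOf_iff_prefix] using h3)]
        rw [if_neg (by simpa [List.isPrefixOf_iff_prefix] using h4)]
        rw [if_neg (by simpa [List.isPrefixOf_iff_prefix] using h5)]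
        rw [if_pos (by simpa [List.isPrefixOf_iff_prefix] using h6)]
        rw [← hsplit]
        rw [pv_pass pvK1 pvV1 pvK6 (by decide) (by unfold pvNoOv; decide)]
        rw [pv_pass pvK2 pvV2 pvK6 (by decide) (by unfold pvNoOv; decide)]
        rw [pv_pass pvK3 pvV3 pvK6 (by decide) (by unfold pvNoOv; decide)]
        rw [pv_pass pvK4 pvV4 pvK6 (by decide) (by unfold pvNoOv; decide)]
        rw [pv_pass pvK5 pvV5 pvK6 (by decide) (by unfold pvNoOv; decide)]
        rw [pv_replace_match pvK6 pvV6 _ (by decide) (List.prefix_append _ _), List.drop_left]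
        change pvV6 ++ pvChainA (t.drop 5) = pvV6 ++ pvScan (t.drop 5)
        rw [ih _ hlen']
      have nn1 := h1
      have n2_0 := pv_noPrefix_lift pvK1 pvV1 (by decide) (pvV1).tail (by decide) pvK2 (pvK2).tail (by decide) (pv_noLt _ (by decide)) c _ h2
      have nn2 := n2_0
      have n3_0 := pv_noPrefix_lift pvK1 pvV1 (by decide) (pvV1).tail (by decide) pvK3 (pvK3).tail (by decide) (pv_noLt _ (by decide)) c _ h3
      have n3_1 := pv_noPrefix_lift pvK2 pvV2 (by decide) (pvV2).tail (by decide) pvK3 (pvK3).tail (by decide) (pv_noLt _ (by decide)) c _ n3_0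
      have nn3 := n3_1
      have n4_0 := pv_noPrefix_lift pvK1 pvV1 (by decide) (pvV1).tail (by decide) pvK4 (pvK4).tail (by decide) (pv_noLt _ (by decide)) c _ h4
      have n4_1 := pv_noPrefix_lift pvK2 pvV2 (by decide) (pvV2).tail (by decide) pvK4 (pvK4).tail (by decide) (pv_noLt _ (by decide)) c _ n4_0
      have n4_2 := pv_noPrefix_lift pvK3 pvV3 (by decide) (pvV3).tail (by decide) pvK4 (pvK4).tail (by decide) (pv_noLt _ (by decide)) c _ n4_1
      have nn4 := n4_2
      have n5_0 := pv_noPrefix_lift pvK1 pvV1 (by decide) (pvV1).tail (by decide) pvK5 (pvK5).tail (by decide) (pv_noLt _ (by decide)) c _ h5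
      have n5_1 := pv_noPrefix_lift pvK2 pvV2 (by decide) (pvV2).tail (by decide) pvK5 (pvK5).tail (by decide) (pv_noLt _ (by decide)) c _ n5_0
      have n5_2 := pv_noPrefix_lift pvK3 pvV3 (by decide) (pvV3).tail (by decide) pvK5 (pvK5).tail (by decide) (pv_noLt _ (by decide)) c _ n5_1
      have n5_3 := pv_noPrefix_lift pvK4 pvV4 (by decide) (pvV4).tail (by decide) pvK5 (pvK5).tail (by decide) (pv_noLt _ (by decide)) c _ n5_2
      have nn5 := n5_3
      have n6_0 := pv_noPrefix_lift pvK1 pvV1 (by decide) (pvV1).tail (by decide) pvK6 (pvK6).tail (by decide) (pv_noLt _ (by decide)) c _ h6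
      have n6_1 := pv_noPrefix_lift pvK2 pvV2 (by decide) (pvV2).tail (by decide) pvK6 (pvK6).tail (by decide) (pv_noLt _ (by decide)) c _ n6_0
      have n6_2 := pv_noPrefix_lift pvK3 pvV3 (by decide) (pvV3).tail (by decide) pvK6 (pvK6).tail (by decide) (pv_noLt _ (by decide)) c _ n6_1
      have n6_3 := pv_noPrefix_lift pvK4 pvV4 (by decide) (pvV4).tail (by decide) pvK6 (pvK6).tail (by decide) (pv_noLt _ (by decide)) c _ n6_2
      have n6_4 := pv_noPrefix_lift pvK5 pvV5 (by decide) (pvV5).tail (by decide) pvK6 (pvK6).tail (by decide) (pv_noLt _ (by decide)) c _ n6_3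
      have nn6 := n6_4
      unfold pvChainA
      rw [pv_replace_cons_no pvK1 pvV1 c _ (by decide) nn1]
      rw [pv_replace_cons_no pvK2 pvV2 c _ (by decide) nn2]
      rw [pv_replace_cons_no pvK3 pvV3 c _ (by decide) nn3]
      rw [pv_replace_cons_no pvK4 pvV4 c _ (by decide) nn4]
      rw [pv_replace_cons_no pvK5 pvV5 c _ (by decide) nn5]
      rw [pv_replace_cons_no pvK6 pvV6 c _ (by decide) nn6]
      rw [pvScan]
      rw [if_neg (by simpa [List.isPrefixOf_iff_prefix] using h1)]
      rw [if_neg (by simpa [List.isPrefixOf_iff_prefix] using h2)]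
      rw [if_neg (by simpa [List.isPrefixOf_iff_prefix] using h3)]
      rw [if_neg (by simpa [List.isPrefixOf_iff_prefix] using h4)]
      rw [if_neg (by simpa [List.isPrefixOf_iff_prefix] using h5)]
      rw [if_neg (by simpa [List.isPrefixOf_iff_prefix] using h6)]
      change c :: pvChainA t = c :: pvScan t
      rw [ih t ht]

theorem pv_str (s : String) : setHTML_py s = setHTML_py_alt s := by
  apply String.toList_inj.mp
  unfold setHTML_py setHTML_py_alt
  simp only [PySem.Str.toList_replace]
  rw [show (String.ofList (pvScan s.toList)).toList = pvScan s.toList by simp]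
  exact pv_main s.toList.length s.toList le_rfl

-- ===== VERDICT (by name: the statement is the Claim_ definition above) =====
theorem setHTML_py_spec : Claim_equal_setHTML_py := by
  intro s _
  unfold Spec_setHTML_py
  exact pv_str s
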